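-- pv_equiv track=rewrite | github.com/liuchengLYC/algorithm_pa1 | check_pa1_sorted.py | is_contiguous_seq
-- ===== SOURCE A (Python) =====
-- def strictly_increasing(seq):
--     return all(seq[i] < seq[i+1] for i in range(len(seq)-1))
--
-- def is_contiguous_seq(seq):
--     n = len(seq)
--     if n == 0: return False
--     # 0..n-1
--     if seq[0] == 0 and strictly_increasing(seq) and seq[-1] == n-1:
--         return all(x == i for i, x in enumerate(seq))
--     # 1..n
--     if seq[0] == 1 and strictly_increasing(seq) and seq[-1] == n:
--         return all(x == i for i, x in enumerate(seq, start=1))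
--     return False
-- ===== SOURCE B (Python) =====
-- def is_contiguous_seq(seq):
--     s = list(seq)
--     if not s or s[0] not in (0, 1):
--         return False
--     return all(b - a == 1 for a, b in zip(s, s[1:]))
-- ===== Notes on version B (the rewrite author's own statement) =====
-- stated objective: alternative
-- what changed: Replaces A's comparison of each element against its absolute index (enumerate passes plus strictly_increasing and endpoint guards) with a local-difference characterization: first element must be 0 or 1 and every adjacent pair must differ by exactly 1, checked over zip(s, s[1:]); no target positions or ranges are ever computed.
import Mathlib
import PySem

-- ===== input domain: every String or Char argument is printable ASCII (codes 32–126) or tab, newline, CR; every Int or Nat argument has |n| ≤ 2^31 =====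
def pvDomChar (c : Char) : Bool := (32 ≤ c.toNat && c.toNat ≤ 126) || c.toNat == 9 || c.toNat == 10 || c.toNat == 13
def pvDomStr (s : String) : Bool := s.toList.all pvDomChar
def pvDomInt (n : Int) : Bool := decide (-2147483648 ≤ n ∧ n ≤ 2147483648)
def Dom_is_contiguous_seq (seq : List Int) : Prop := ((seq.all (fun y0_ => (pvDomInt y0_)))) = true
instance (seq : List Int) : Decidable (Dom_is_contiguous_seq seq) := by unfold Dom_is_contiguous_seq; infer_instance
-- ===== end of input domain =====

-- B replaces A's index-position checks (enumerate passes, strictly_increasing, endpoint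
-- guards) with a local-difference test: head ∈ {0,1} and every adjacent pair differs by 1
-- (objective: alternative characterization, same O(n) cost).

-- ===== PORT A =====
-- all(seq[i] < seq[i+1] for i in range(len(seq)-1)); both indices are always in
-- range there, so pyGetD with a dummy default is exact.
def strictly_increasing (seq : List Int) : Bool :=
  (List.range (seq.length - 1)).all (fun i =>
    decide (PySem.List.pyGetD seq (i : Int) 0 < PySem.List.pyGetD seq ((i : Int) + 1) 0))

def is_contiguous_seq (seq : List Int) : Bool :=
  let n := seq.length
  if n = 0 then false
  -- seq[0] and seq[-1] are in range here since n > 0, so pyGetD is exact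
  else if PySem.List.pyGetD seq 0 0 == 0 && strictly_increasing seq
          && PySem.List.pyGetD seq (-1) 0 == (n : Int) - 1 then
    (PySem.List.enumerate seq 0).all (fun p => p.2 == p.1)
  else if PySem.List.pyGetD seq 0 0 == 1 && strictly_increasing seq
          && PySem.List.pyGetD seq (-1) 0 == (n : Int) then
    (PySem.List.enumerate seq 1).all (fun p => p.2 == p.1)
  else false

-- ===== PORT B =====
-- zip(s, s[1:]) is the list zipped with its own tail (Python zip truncates, so does List.zip)
def is_contiguous_seq_alt (seq : List Int) : Bool :=
  match seq with
  | [] => false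
  | x :: _ =>
    if x = 0 ∨ x = 1 then (seq.zip seq.tail).all (fun p => p.2 - p.1 == 1)
    else false

-- ===== PRECONDITION & SPEC =====
def Spec_is_contiguous_seq (seq : List Int) (out : Bool) : Prop := out = is_contiguous_seq_alt seq
instance (seq : List Int) (out : Bool) : Decidable (Spec_is_contiguous_seq seq out) := by unfold Spec_is_contiguous_seq; infer_instance

-- ===== CLAIM (what is proved, stated in full; the proofs are below) =====
def Claim_equal_is_contiguous_seq : Prop := ∀ (seq : List Int), Dom_is_contiguous_seq seq → Spec_is_contiguous_seq seq (is_contiguous_seq seq)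

-- ===== LEMMAS AND PROOFS =====

-- A's enumerate-all check decides exactly "seq is the range starting at s".
theorem enumerate_all_eq (seq : List Int) (s : Int) :
    ((PySem.List.enumerate seq s).all (fun p => p.2 == p.1))
      = decide (seq = PySem.List.pyRange s (s + seq.length) 1) := by
  induction seq generalizing s with
  | nil => simp [PySem.List.enumerate_nil, PySem.List.pyRange_one_eq_nil (by omega : (s:Int) ≤ s)]
  | cons x xs ih =>
    have hlt : s < s + ((x :: xs).length : Int) := by
      have : 0 < (x :: xs).length := by simp
      omega
    rw [PySem.List.enumerate_cons, PySem.List.pyRange_one_cons hlt]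
    simp only [List.all_cons, ih (s + 1)]
    have : s + 1 + (xs.length : Int) = s + ((x :: xs).length : Int) := by
      simp [List.length_cons]; omega
    rw [this]
    by_cases hx : x = s <;> simp [hx]

-- B's adjacent-difference check (on a list with head x) decides the same proposition.
theorem zipdiff_all_eq (x : Int) (xs : List Int) :
    (((x :: xs).zip xs).all (fun p => p.2 - p.1 == 1))
      = decide (x :: xs = PySem.List.pyRange x (x + ((x :: xs).length : Int)) 1) := by
  induction xs generalizing x with
  | nil =>
    have h : PySem.List.pyRange x (x + 1) 1 = [x] := by
      rw [PySem.List.pyRange_one_cons (by omega)]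
      simp [PySem.List.pyRange_one_eq_nil (by omega : x + 1 ≤ x + 1)]
    simp [h]
  | cons y ys ih =>
    have hlt : x < x + ((x :: y :: ys).length : Int) := by
      have : 0 < (x :: y :: ys).length := by simp
      omega
    rw [PySem.List.pyRange_one_cons hlt]
    have hlen : x + 1 + ((y :: ys).length : Int) = x + ((x :: y :: ys).length : Int) := by
      simp [List.length_cons]; omega
    simp only [List.zip_cons_cons, List.all_cons, ih y]
    by_cases hy : y = x + 1
    · subst hy
      rw [hlen]
      simp
    · have h1 : (y - x == 1) = false := by
        rw [beq_eq_false_iff_ne]; omega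
      have h2 : decide (x :: y :: ys
          = x :: PySem.List.pyRange (x + 1) (x + ((x :: y :: ys).length : Int)) 1) = false := by
        rw [decide_eq_false_iff_not]
        intro h
        have hlt2 : x + 1 < x + ((x :: y :: ys).length : Int) := by
          have : 1 < (x :: y :: ys).length := by simp
          omega
        rw [PySem.List.pyRange_one_cons hlt2] at h
        simp only [List.cons.injEq] at h
        exact hy h.2.1
      rw [h1, h2]
      simp

-- A's endpoint/monotonicity guards hold whenever seq IS the range starting at s.
theorem pyGetD_range (s n : Int) (k : Nat) (hk : (k : Int) < n - s) :
    PySem.List.pyGetD (PySem.List.pyRange s n 1) (k : Int) 0 = s + k := by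
  rw [PySem.List.pyRange_one, PySem.List.pyGetD_natCast]
  have hk' : k < (n - s).toNat := by omega
  rw [List.getD_eq_getElem _ _ (by simpa using hk')]
  simp

theorem guards_of_range (seq : List Int) (s : Int) (hn : seq ≠ [])
    (h : seq = PySem.List.pyRange s (s + seq.length) 1) :
    PySem.List.pyGetD seq 0 0 = s ∧ strictly_increasing seq = true ∧
      PySem.List.pyGetD seq (-1) 0 = s + (seq.length : Int) - 1 := by
  have hlen : 0 < seq.length := List.length_pos_iff.mpr hn
  have hlen' : 1 ≤ (seq.length : Int) := by omega
  refine ⟨?_, ?_, ?_⟩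
  · conv_lhs => rw [h]
    have := pyGetD_range s (s + seq.length) 0 (by omega)
    simpa using this
  · unfold strictly_increasing
    rw [List.all_eq_true]
    intro i hi
    rw [List.mem_range] at hi
    conv_lhs => rw [h]
    have hi' : (i : Int) < (seq.length : Int) - 1 := by omega
    have h1 := pyGetD_range s (s + seq.length) i (by omega)
    have h2 := pyGetD_range s (s + seq.length) (i + 1) (by push_cast; omega)
    push_cast at h2
    rw [h1, h2]
    simp
  · obtain ⟨m, hm⟩ : ∃ m : Int, s + (seq.length : Int) = m + 1 :=
      ⟨s + (seq.length : Int) - 1, by omega⟩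
    have hr : seq = PySem.List.pyRange s (m + 1) 1 := by rw [← hm]; exact h
    have hsplit : PySem.List.pyRange s (m + 1) 1 = PySem.List.pyRange s m 1 ++ [m] :=
      PySem.List.pyRange_one_succ_right (by omega : s ≤ m)
    conv_lhs => rw [hr, hsplit]
    rw [PySem.List.pyGetD_neg_one_append_singleton]
    omega

-- B on a nonempty list equals "seq = range 0..n-1 or seq = range 1..n".
theorem alt_eq_ranges (seq : List Int) (hne : seq ≠ []) :
    is_contiguous_seq_alt seq
      = (decide (seq = PySem.List.pyRange 0 ((seq.length : Int)) 1)
         || decide (seq = PySem.List.pyRange 1 ((seq.length : Int) + 1) 1)) := by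
  match seq with
  | [] => exact absurd rfl hne
  | x :: xs =>
    have hlt0 : (0 : Int) < ((x :: xs).length : Int) := by
      have : 0 < (x :: xs).length := by simp
      omega
    rw [is_contiguous_seq_alt]
    simp only [List.tail_cons]
    by_cases h0 : x = 0
    · subst h0
      have hB : decide ((0 : Int) :: xs = PySem.List.pyRange 1 (((0 :: xs : List Int).length : Int) + 1) 1) = false := by
        rw [decide_eq_false_iff_not]
        intro h
        rw [PySem.List.pyRange_one_cons (by omega)] at h
        simp only [List.cons.injEq] at h
        exact absurd h.1 (by norm_num)
      rw [if_pos (Or.inl rfl), zipdiff_all_eq, hB]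
      simp
    · by_cases h1 : x = 1
      · subst h1
        have hA : decide ((1 : Int) :: xs = PySem.List.pyRange 0 (((1 :: xs : List Int).length : Int)) 1) = false := by
          rw [decide_eq_false_iff_not]
          intro h
          rw [PySem.List.pyRange_one_cons hlt0] at h
          simp only [List.cons.injEq] at h
          exact absurd h.1 (by norm_num)
        rw [if_pos (Or.inr rfl), zipdiff_all_eq, hA]
        have : (1 : Int) + (((1 :: xs : List Int)).length : Int) = ((1 :: xs : List Int).length : Int) + 1 := by omega
        rw [this]
        simp
      · have hA : decide (x :: xs = PySem.List.pyRange 0 (((x :: xs).length : Int)) 1) = false := by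
          rw [decide_eq_false_iff_not]
          intro h
          rw [PySem.List.pyRange_one_cons hlt0] at h
          simp only [List.cons.injEq] at h
          exact h0 h.1
        have hB : decide (x :: xs = PySem.List.pyRange 1 (((x :: xs).length : Int) + 1) 1) = false := by
          rw [decide_eq_false_iff_not]
          intro h
          rw [PySem.List.pyRange_one_cons (by omega)] at h
          simp only [List.cons.injEq] at h
          exact h1 h.1
        rw [if_neg (by tauto), hA, hB]
        simp

-- ===== VERDICT (by name: the statement is the Claim_ definition above) =====
theorem is_contiguous_seq_spec : Claim_equal_is_contiguous_seq := by
  intro seq _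
  show is_contiguous_seq seq = is_contiguous_seq_alt seq
  by_cases hne : seq = []
  · subst hne; rfl
  · have hn : seq.length ≠ 0 := fun h => hne (List.length_eq_zero_iff.mp h)
    rw [is_contiguous_seq, alt_eq_ranges seq hne]
    simp only [if_neg hn]
    rw [enumerate_all_eq, enumerate_all_eq]
    have e0 : (0 : Int) + (seq.length : Int) = (seq.length : Int) := by omega
    have e1 : (1 : Int) + (seq.length : Int) = (seq.length : Int) + 1 := by omega
    rw [e0, e1]
    by_cases hA : seq = PySem.List.pyRange 0 (seq.length : Int) 1
    · obtain ⟨g1, g2, g3⟩ := guards_of_range seq 0 hne (by rw [e0]; exact hA)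
      have g3' : PySem.List.pyGetD seq (-1) 0 = (seq.length : Int) - 1 := by rw [g3]; ring
      rw [g1, g2, g3', decide_eq_true hA]
      simp
    · by_cases hB : seq = PySem.List.pyRange 1 ((seq.length : Int) + 1) 1
      · obtain ⟨g1, g2, g3⟩ := guards_of_range seq 1 hne (by rw [add_comm]; exact hB)
        have g3' : PySem.List.pyGetD seq (-1) 0 = (seq.length : Int) := by rw [g3]; ring
        rw [g1, g2, g3', decide_eq_false hA, decide_eq_true hB]
        simp
      · rw [decide_eq_false hA, decide_eq_false hB]
        split_ifs <;> simp
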